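-- pv_equiv track=rewrite | github.com/Amirsorouri00/CafeQueraInterview | sotoon/test.py | countStrictDecreasingSubArrays
-- ===== SOURCE A (Python) =====
-- def countStrictDecreasingSubArrays(arr, arrLen):
--     cnt = 0
--     if arrLen == 0:
--         return cnt
--
--     # Initialize length of current
--     # decreasing subarray
--     len = 1
--
--     # Traverse through the array
--     for i in range(arrLen - 1):
--
--         # If arr[i+1] is less than arr[i],
--         # then increment length
--         if (arr[i + 1] < arr[i]):
--             len += 1
--
--         # Else Update count and
--         # reset length
--         else:
--             cnt += (((len - 1) * len) // 2)
--             len = 1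
--
--     # If last length is more than 1
--     if (len > 1):
--         cnt += (((len - 1) * len) // 2)
--
--     return cnt
-- ===== SOURCE B (Python) =====
-- def countStrictDecreasingSubArrays(arr, arrLen):
--     # Count per ending index: each position extends a strictly decreasing
--     # run of length `run`, contributing run-1 new subarrays ending there.
--     cnt = 0
--     run = 1
--     for i in range(1, arrLen):
--         run = run + 1 if arr[i] < arr[i - 1] else 1
--         cnt += run - 1
--     return cnt
-- ===== Notes on version B (the rewrite author's own statement) =====
-- stated objective: simpler
-- what changed: B accumulates run-1 per ending index in a single uniform loop instead of summing a closed-form triangular number at each maximal-run boundary plus a separate end-of-array fixup.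
import Mathlib
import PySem

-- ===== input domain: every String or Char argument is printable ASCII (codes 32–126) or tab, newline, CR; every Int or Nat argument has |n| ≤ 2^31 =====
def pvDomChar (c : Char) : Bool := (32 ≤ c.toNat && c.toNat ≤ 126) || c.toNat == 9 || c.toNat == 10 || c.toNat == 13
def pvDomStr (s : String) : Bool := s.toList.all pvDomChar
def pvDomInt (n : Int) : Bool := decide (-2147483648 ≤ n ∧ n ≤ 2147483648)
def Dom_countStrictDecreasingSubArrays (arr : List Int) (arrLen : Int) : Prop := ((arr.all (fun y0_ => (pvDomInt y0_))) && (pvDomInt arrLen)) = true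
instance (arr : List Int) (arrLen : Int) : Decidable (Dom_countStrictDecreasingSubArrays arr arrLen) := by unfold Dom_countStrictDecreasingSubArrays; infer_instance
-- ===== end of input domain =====

-- B replaces A's per-maximal-run triangular-number accumulation (with its separate
-- end-of-array fixup) by one uniform loop adding run-1 per ending index (objective: simpler).

-- ===== PORT A =====
-- Literal port of A: for i in range(arrLen-1), compare arr[i+1] < arr[i]; on a break add
-- (len-1)*len//2 and reset; after the loop add the last run's triangle if len > 1.
-- Indexing uses pyGetD with default 0; inside Pre_ every access is in range, matching Python.
def countStrictDecreasingSubArrays (arr : List Int) (arrLen : Int) : Int :=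
  if arrLen = 0 then 0
  else
    let s := (PySem.List.pyRange 0 (arrLen - 1) 1).foldl
      (fun (st : Int × Int) i =>
        if PySem.List.pyGetD arr (i + 1) 0 < PySem.List.pyGetD arr i 0 then
          (st.1, st.2 + 1)
        else
          (st.1 + PySem.Int.floordiv ((st.2 - 1) * st.2) 2, 1))
      (0, 1)
    if s.2 > 1 then s.1 + PySem.Int.floordiv ((s.2 - 1) * s.2) 2 else s.1

-- ===== PORT B =====
-- Port of Source B: for i in range(1, arrLen), update the streak length `run` ending at i
-- and add run-1 to cnt each iteration.
def countStrictDecreasingSubArrays_alt (arr : List Int) (arrLen : Int) : Int :=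
  ((PySem.List.pyRange 1 arrLen 1).foldl
    (fun (st : Int × Int) i =>
      let run : Int :=
        if PySem.List.pyGetD arr i 0 < PySem.List.pyGetD arr (i - 1) 0 then st.2 + 1 else 1
      (st.1 + (run - 1), run))
    (0, 1)).1

-- ===== PRECONDITION & SPEC =====
-- Pre_ excludes exactly the inputs where Python A raises IndexError: arrLen ≥ 2 with
-- arrLen > len(arr) makes A read arr[arrLen-1] out of range (arrLen ≤ 1 never indexes).
def Pre_countStrictDecreasingSubArrays (arr : List Int) (arrLen : Int) : Prop :=
  arrLen ≤ arr.length ∨ arrLen ≤ 1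
instance (arr : List Int) (arrLen : Int) : Decidable (Pre_countStrictDecreasingSubArrays arr arrLen) := by
  unfold Pre_countStrictDecreasingSubArrays; infer_instance
def pvWitness_countStrictDecreasingSubArrays : List Int × Int := ([5, 3, 1, 4, 2], 5)
def Spec_countStrictDecreasingSubArrays (arr : List Int) (arrLen : Int) (out : Int) : Prop := out = countStrictDecreasingSubArrays_alt arr arrLen
instance (arr : List Int) (arrLen : Int) (out : Int) : Decidable (Spec_countStrictDecreasingSubArrays arr arrLen out) := by unfold Spec_countStrictDecreasingSubArrays; infer_instance

-- ===== CLAIM (what is proved, stated in full; the proofs are below) =====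
def Claim_equal_countStrictDecreasingSubArrays : Prop := ∀ (arr : List Int) (arrLen : Int), Dom_countStrictDecreasingSubArrays arr arrLen → Pre_countStrictDecreasingSubArrays arr arrLen → Spec_countStrictDecreasingSubArrays arr arrLen (countStrictDecreasingSubArrays arr arrLen)

-- ===== LEMMAS AND PROOFS =====

-- the triangular number A adds at each run break
def pvT (l : Int) : Int := PySem.Int.floordiv ((l - 1) * l) 2

-- A's step / B's step, abstracted over the comparison outcome
def pvStepA (st : Int × Int) (b : Bool) : Int × Int :=
  if b then (st.1, st.2 + 1) else (st.1 + pvT st.2, 1)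

def pvStepB (st : Int × Int) (b : Bool) : Int × Int :=
  let run : Int := if b then st.2 + 1 else 1
  (st.1 + (run - 1), run)

theorem pvT_one : pvT 1 = 0 := by decide

theorem pvT_succ (l : Int) : pvT (l + 1) = pvT l + l := by
  have h : (l + 1 - 1) * (l + 1) = (l - 1) * l + l * 2 := by ring
  unfold pvT
  rw [h, PySem.Int.floordiv_eq_ediv_of_pos (by norm_num),
      PySem.Int.floordiv_eq_ediv_of_pos (by norm_num),
      Int.add_mul_ediv_right _ _ (by norm_num : (2:Int) ≠ 0)]

-- A's state always keeps the run length at least 1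
theorem pv_len_ge_one {a : Type} (ks : List a) (g : a -> Bool) (c l : Int) (h : 1 <= l) :
    1 <= (ks.foldl (fun st k => pvStepA st (g k)) (c, l)).2 := by
  induction ks generalizing c l with
  | nil => simpa using h
  | cons k ks' ih =>
    cases hk : g k with
    | true => simpa [List.foldl_cons, pvStepA, hk] using ih _ (l + 1) (by omega)
    | false => simpa [List.foldl_cons, pvStepA, hk] using ih _ 1 (by omega)

-- A's end-of-loop fixup equals adding pvT unconditionally, given run length >= 1
theorem pv_final (p : Int × Int) (h : 1 <= p.2) :
    (if p.2 > 1 then p.1 + PySem.Int.floordiv ((p.2 - 1) * p.2) 2 else p.1)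
      = (p.1 + pvT p.2, p.2).1 := by
  by_cases hl : p.2 > 1
  · simp [hl, pvT]
  · have h1 : p.2 = 1 := by omega
    simp [h1, pvT_one]

-- loop invariant: B's accumulator is A's accumulator plus the triangle of the current run
theorem pv_fold_inv (bs : List Bool) : ∀ (cA cB l : Int), cB = cA + pvT l →
    bs.foldl pvStepB (cB, l)
      = ((bs.foldl pvStepA (cA, l)).1 + pvT (bs.foldl pvStepA (cA, l)).2,
         (bs.foldl pvStepA (cA, l)).2) := by
  induction bs with
  | nil => intro cA cB l h; simp [h]
  | cons b bs ih =>
    intro cA cB l h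
    cases b with
    | true =>
      simp only [List.foldl_cons, pvStepA, pvStepB, if_pos]
      exact ih cA (cB + (l + 1 - 1)) (l + 1) (by rw [h, pvT_succ]; ring)
    | false =>
      simp only [List.foldl_cons, pvStepA, pvStepB]
      norm_num
      exact ih (cA + pvT l) cB 1 (by rw [h, pvT_one]; ring)

theorem countStrictDecreasingSubArrays_spec' (arr : List Int) (arrLen : Int) :
    countStrictDecreasingSubArrays arr arrLen = countStrictDecreasingSubArrays_alt arr arrLen := by
  unfold countStrictDecreasingSubArrays countStrictDecreasingSubArrays_alt
  by_cases h0 : arrLen = 0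
  · subst h0
    simp [PySem.List.pyRange_one_eq_nil (by norm_num : (0:Int) ≤ 1)]
  · simp only [if_neg h0]
    -- rewrite both ranges as shifts of List.range n, n = (arrLen - 1).toNat
    have hA : PySem.List.pyRange 0 (arrLen - 1) 1
        = (List.range (arrLen - 1).toNat).map (fun k : Nat => (0 : Int) + k) := by
      rw [PySem.List.pyRange_one]; norm_num
    have hB : PySem.List.pyRange 1 arrLen 1
        = (List.range (arrLen - 1).toNat).map (fun k : Nat => (1 : Int) + k) := by
      rw [PySem.List.pyRange_one]
    rw [hA, hB, List.foldl_map, List.foldl_map]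
    -- both folds are pvStepA / pvStepB over the same decision sequence
    have eA : (fun (st : Int × Int) (k : Nat) =>
          if PySem.List.pyGetD arr ((0 : Int) + k + 1) 0 < PySem.List.pyGetD arr ((0 : Int) + k) 0 then
            (st.1, st.2 + 1)
          else (st.1 + PySem.Int.floordiv ((st.2 - 1) * st.2) 2, 1))
        = (fun (st : Int × Int) (k : Nat) => pvStepA st
            (decide (PySem.List.pyGetD arr ((k : Int) + 1) 0 < PySem.List.pyGetD arr (k : Int) 0))) := by
      funext st k
      simp only [pvStepA, pvT, zero_add, decide_eq_true_eq]
    have eB : (fun (st : Int × Int) (k : Nat) =>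
          let run : Int :=
            if PySem.List.pyGetD arr ((1 : Int) + k) 0 < PySem.List.pyGetD arr ((1 : Int) + k - 1) 0 then
              st.2 + 1 else 1
          (st.1 + (run - 1), run))
        = (fun (st : Int × Int) (k : Nat) => pvStepB st
            (decide (PySem.List.pyGetD arr ((k : Int) + 1) 0 < PySem.List.pyGetD arr (k : Int) 0))) := by
      funext st k
      have h1 : (1 : Int) + k = (k : Int) + 1 := by ring
      have h2 : (1 : Int) + k - 1 = (k : Int) := by ring
      have h3 : (k : Int) + 1 - 1 = (k : Int) := by ring
      simp only [pvStepB, h1, h3, decide_eq_true_eq]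
    rw [eA, eB]
    have key := pv_fold_inv ((List.range (arrLen - 1).toNat).map (fun k : Nat =>
        decide (PySem.List.pyGetD arr ((k : Int) + 1) 0 < PySem.List.pyGetD arr (k : Int) 0)))
      0 0 1 (by rw [pvT_one]; ring)
    rw [List.foldl_map, List.foldl_map] at key
    rw [key]
    exact pv_final _ (pv_len_ge_one _ _ 0 1 (by norm_num))

-- ===== VERDICT (by name: the statement is the Claim_ definition above) =====
theorem countStrictDecreasingSubArrays_spec : Claim_equal_countStrictDecreasingSubArrays := by
  intro arr arrLen _ _
  unfold Spec_countStrictDecreasingSubArrays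
  exact countStrictDecreasingSubArrays_spec' arr arrLen
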